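-- pv_equiv track=rewrite | github.com/nasosev/voronoi-hex | simplicialHomology.py | toplexify
-- ===== SOURCE A (Python) =====
-- def toplexify(simplices):
--     """Reduce a simplicial complex to merely specification of its toplices"""
--     simplices = sorted(simplices, key=len, reverse=True)
--     return [
--         spx
--         for i, spx in enumerate(simplices)
--         if not [
--             sp2
--             for j, sp2 in enumerate(simplices)
--             if (i != j and set(spx).issubset(sp2)) and (i > j or set(spx) == set(sp2))
--         ]
--     ]
-- ===== SOURCE B (Python) =====
-- def toplexify(simplices):
--     """Reduce a simplicial complex to merely specification of its toplices"""
--     simplices = sorted(simplices, key=len, reverse=True)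
--     counts = {}
--     for spx in simplices:
--         k = tuple(sorted(set(spx)))
--         counts[k] = counts.get(k, 0) + 1
--     keys = list(counts)
--     out = []
--     for spx in simplices:
--         k = tuple(sorted(set(spx)))
--         if counts[k] == 1 and not any(t != k and set(k).issubset(t) for t in keys):
--             out.append(spx)
--     return out
-- ===== Notes on version B (the rewrite author's own statement) =====
-- stated objective: faster
-- what changed: A tests every simplex against every other with an index/length comparison (a full quadratic pairwise subset scan); B builds a one-pass occurrence table keyed by the canonical (sorted, deduplicated) vertex set and keeps a simplex iff its set occurs exactly once and is not a proper subset of any other distinct set in the table, so the inner scan runs over the k distinct vertex sets instead of all n simplices.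
-- outside the precondition, e.g. on toplexify([[1, 1, 1], [1, 2]]): A returns [[1, 1, 1], [1, 2]], B returns [[1, 2]]
import Mathlib
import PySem

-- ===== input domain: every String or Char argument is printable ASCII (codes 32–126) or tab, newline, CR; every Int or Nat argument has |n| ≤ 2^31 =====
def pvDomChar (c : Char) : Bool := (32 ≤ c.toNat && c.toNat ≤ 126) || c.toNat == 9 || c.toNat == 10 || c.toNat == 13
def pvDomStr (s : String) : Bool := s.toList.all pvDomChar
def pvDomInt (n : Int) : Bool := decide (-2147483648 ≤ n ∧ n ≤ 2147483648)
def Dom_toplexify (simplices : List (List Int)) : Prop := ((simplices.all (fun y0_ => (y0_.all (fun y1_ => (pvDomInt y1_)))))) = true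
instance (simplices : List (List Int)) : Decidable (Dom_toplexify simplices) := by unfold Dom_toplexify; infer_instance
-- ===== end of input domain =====

-- B replaces A's pairwise scan of every simplex against every other by a one-pass occurrence
-- table of canonical vertex sets plus a maximality test against the distinct sets only
-- (measured faster in a timing run on duplicate-heavy inputs).

-- ===== PORT A =====
def toplexify (simplices : List (List Int)) : List (List Int) :=
  let s := PySem.List.sorted simplices (fun l => (l.length : Int)) true
  (PySem.List.enumerate s).foldl
    (fun acc p =>
      if ((PySem.List.enumerate s).foldl
            (fun acc2 q =>
              if ((!(p.1 == q.1)) && PySem.Set.issubset (PySem.Set.ofList p.2) q.2)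
                  && (decide (p.1 > q.1) || PySem.Set.equal (PySem.Set.ofList p.2) (PySem.Set.ofList q.2))
              then acc2 ++ [q.2] else acc2) []).isEmpty
      then acc ++ [p.2] else acc) []

-- ===== PORT B =====
-- tuple(sorted(set(spx))): the canonical form of a simplex's vertex set
def pvCanon (spx : List Int) : List Int :=
  PySem.List.sorted (PySem.Set.ofList spx) (fun x => x)

def toplexify_alt (simplices : List (List Int)) : List (List Int) :=
  let s := PySem.List.sorted simplices (fun l => (l.length : Int)) true
  let counts := s.foldl (fun d spx => d.modify (pvCanon spx) 0 (· + 1)) (PySem.Dict.empty : PySem.Dict (List Int) Int)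
  let keys := counts.keys
  s.foldl (fun out spx =>
    if (counts.getD (pvCanon spx) 0 == 1)
        && !(keys.any (fun t =>
              (!(t == pvCanon spx)) && PySem.Set.issubset (PySem.Set.ofList (pvCanon spx)) t))
    then out ++ [spx] else out) []

-- ===== PRECONDITION & SPEC =====
-- Pre_ restricts to genuine simplices (no repeated vertex in a list): on a list with a repeated
-- vertex the list length differs from the vertex-set size, and A's length-sorted index test then
-- keeps simplices whose vertex set is strictly contained in another's — an artefact B does not copy.
def Pre_toplexify (simplices : List (List Int)) : Prop := ∀ l ∈ simplices, l.Nodup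
instance (simplices : List (List Int)) : Decidable (Pre_toplexify simplices) := by unfold Pre_toplexify; infer_instance
def pvWitness_toplexify : List (List Int) := [[1, 2], [2], [3]]
def Spec_toplexify (simplices : List (List Int)) (out : List (List Int)) : Prop := out = toplexify_alt simplices
instance (simplices : List (List Int)) (out : List (List Int)) : Decidable (Spec_toplexify simplices out) := by unfold Spec_toplexify; infer_instance

-- ===== CLAIM (what is proved, stated in full; the proofs are below) =====
def Claim_equal_toplexify : Prop := ∀ (simplices : List (List Int)), Dom_toplexify simplices → Pre_toplexify simplices → Spec_toplexify simplices (toplexify simplices)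

-- ===== LEMMAS AND PROOFS =====

theorem mem_pvCanon (a : List Int) (x : Int) : x ∈ pvCanon a ↔ x ∈ a := by
  simp [pvCanon, PySem.List.mem_sorted, PySem.Set.mem_ofList]

theorem pvCanon_eq_of_mem_iff (a b : List Int) (h : ∀ x, x ∈ a ↔ x ∈ b) :
    pvCanon a = pvCanon b := by
  apply PySem.List.sorted_eq_sorted_of_perm _ _ _ (fun x y hxy => hxy)
  exact (List.perm_ext_iff_of_nodup (PySem.Set.nodup_ofList a) (PySem.Set.nodup_ofList b)).mpr
    (by simp [PySem.Set.mem_ofList, h])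

theorem pvCanon_nodup (a : List Int) : (pvCanon a).Nodup :=
  (PySem.List.sorted_ofList_pairwise_lt a).imp (fun h => ne_of_lt h)

theorem pvCanon_length (a : List Int) (h : a.Nodup) : (pvCanon a).length = a.length := by
  simp [pvCanon, PySem.List.length_sorted, PySem.Set.ofList_eq_self_of_nodup a h]

theorem enum_filter_snd {α : Type} (P : Int × α → Bool) (Q : α → Bool) :
    ∀ (s : List α) (n : Int), (∀ i (hi : i < s.length), P (n + i, s[i]) = Q s[i]) →
    ((PySem.List.enumerate s n).filter P).map Prod.snd = s.filter Q := by
  intro s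
  induction s with
  | nil => intro n h; simp [PySem.List.enumerate]
  | cons x t ih =>
    intro n h
    have h0 : P (n, x) = Q x := by simpa using h 0 (by simp)
    have ht := ih (n + 1) (fun i hi => by
      have := h (i + 1) (by simpa using hi)
      simpa [add_assoc, add_comm, add_left_comm] using this)
    simp only [PySem.List.enumerate, List.filter_cons, h0]
    cases hq : Q x <;> simp [ht]

theorem two_le_count_of_ne {α : Type} [BEq α] [LawfulBEq α] (l : List α) (v : α) (i j : Nat)
    (hi : i < l.length) (hj : j < l.length) (hij : i ≠ j) (hvi : l[i] = v) (hvj : l[j] = v) :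
    2 ≤ l.count v := by
  rcases Nat.lt_or_ge i j with hlt | hge
  · have hsplit : l = l.take j ++ l[j] :: l.drop (j + 1) := by
      rw [List.getElem_cons_drop, List.take_append_drop]
    have hmem : v ∈ l.take j := by
      have hh : i < (l.take j).length := by simp [List.length_take]; omega
      have he : (l.take j)[i] = l[i] := List.getElem_take
      rw [← hvi, ← he]; exact List.getElem_mem hh
    have hpos := List.count_pos_iff.mpr hmem
    conv_rhs => rw [hsplit]
    simp [List.count_append, hvj]
    omega
  · have hlt2 : j < i := by omega
    have hsplit : l = l.take i ++ l[i] :: l.drop (i + 1) := by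
      rw [List.getElem_cons_drop, List.take_append_drop]
    have hmem : v ∈ l.take i := by
      have hh : j < (l.take i).length := by simp [List.length_take]; omega
      have he : (l.take i)[j] = l[j] := List.getElem_take
      rw [← hvj, ← he]; exact List.getElem_mem hh
    have hpos := List.count_pos_iff.mpr hmem
    conv_rhs => rw [hsplit]
    simp [List.count_append, hvi]
    omega

theorem exists_other_index_of_two_le_count {α : Type} [BEq α] [LawfulBEq α] (l : List α) (v : α) (i : Nat)
    (hi : i < l.length) (hv : l[i] = v) (h : 2 ≤ l.count v) :
    ∃ j, ∃ (hj : j < l.length), j ≠ i ∧ l[j] = v := by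
  have hsplit : l = l.take i ++ l[i] :: l.drop (i + 1) := by
    rw [List.getElem_cons_drop, List.take_append_drop]
  have hcount : l.count v = (l.take i).count v + 1 + (l.drop (i+1)).count v := by
    conv_lhs => rw [hsplit]
    simp [List.count_append, hv]
    omega
  rcases Nat.lt_or_ge 0 ((l.take i).count v) with hpos | hz
  · rcases List.mem_iff_getElem.mp (List.count_pos_iff.mp hpos) with ⟨j, hj, hje⟩
    have hjl : j < i := by have := hj; simp [List.length_take] at this; omega
    refine ⟨j, by omega, by omega, ?_⟩
    rw [← hje]; exact (List.getElem_take).symm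
  · have hpos : 0 < (l.drop (i+1)).count v := by omega
    rcases List.mem_iff_getElem.mp (List.count_pos_iff.mp hpos) with ⟨m, hm, hme⟩
    have hml : m < l.length - (i+1) := by simpa [List.length_drop] using hm
    refine ⟨i + 1 + m, by omega, by omega, ?_⟩
    rw [← hme]; exact (List.getElem_drop).symm

theorem keep_core (s : List (List Int)) (hn : ∀ l ∈ s, l.Nodup)
    (hpw : List.Pairwise (fun a b => ((b.length : Nat) : Int) ≤ ((a.length : Nat) : Int)) s)
    (i : Nat) (hi : i < s.length) :
    (∀ (a : Int × List Int),
        (∃ k, ∃ (_h : k < s.length), a = ((k : Int), s[k])) →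
          ((i : Int) ≠ a.1 ∧ ∀ x ∈ s[i], x ∈ a.2) →
            ¬((i : Int) > a.1 ∨ ∀ (x : Int), x ∈ s[i] ↔ x ∈ a.2)) ↔
      (List.count (pvCanon s[i]) (List.map pvCanon s) = 1 ∧
        ∀ x ∈ List.map pvCanon s, x ≠ pvCanon s[i] → ¬∀ y ∈ pvCanon s[i], y ∈ x) := by
  have hlen : ∀ p q (_hp : p < s.length) (hq : q < s.length), p < q → s[q].length ≤ s[p].length := by
    intro p q hp hq hpq
    have := (List.pairwise_iff_getElem.mp hpw) p q hp hq hpq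
    exact_mod_cast this
  have hmemmap : pvCanon s[i] ∈ List.map pvCanon s :=
    List.mem_map_of_mem (List.getElem_mem hi)
  have hmapi : (List.map pvCanon s)[i]'(by simpa using hi) = pvCanon s[i] := List.getElem_map _
  constructor
  · intro L
    constructor
    · -- count = 1
      have h1 : 0 < List.count (pvCanon s[i]) (List.map pvCanon s) := List.count_pos_iff.mpr hmemmap
      by_contra hne1
      have h2 : 2 ≤ List.count (pvCanon s[i]) (List.map pvCanon s) := by omega
      obtain ⟨j, hj, hji, hje⟩ := exists_other_index_of_two_le_count (List.map pvCanon s)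
        (pvCanon s[i]) i (by simpa using hi) hmapi h2
      have hj' : j < s.length := by simpa using hj
      have hcj : pvCanon s[j] = pvCanon s[i] := by rw [← hje]; exact (List.getElem_map _).symm
      have hiff : ∀ x, x ∈ s[i] ↔ x ∈ s[j] := by
        intro x
        rw [← mem_pvCanon (s[i]) x, ← mem_pvCanon (s[j]) x, hcj]
      have hne' : (i : Int) ≠ (j : Int) := by intro h; exact hji (by exact_mod_cast h.symm)
      exact L ((j : Int), s[j]) ⟨j, hj', rfl⟩ ⟨hne', fun x hx => (hiff x).mp hx⟩ (Or.inr hiff)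
    · -- maximality
      intro x hx hxne hsub
      obtain ⟨l, hl, rfl⟩ := List.mem_map.mp hx
      obtain ⟨j, hj, rfl⟩ := List.mem_iff_getElem.mp hl
      have hsub' : s[i] ⊆ s[j] := by
        intro y hy
        exact (mem_pvCanon _ _).mp (hsub y ((mem_pvCanon _ _).mpr hy))
      have hcsub : pvCanon s[i] ⊆ pvCanon s[j] := by
        intro y hy
        exact (mem_pvCanon _ _).mpr (hsub' ((mem_pvCanon _ _).mp hy))
      have hsp : (pvCanon s[i]).Subperm (pvCanon s[j]) :=
        (pvCanon_nodup _).subperm hcsub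
      have hlt : (pvCanon s[i]).length < (pvCanon s[j]).length := by
        rcases Nat.lt_or_ge (pvCanon s[i]).length (pvCanon s[j]).length with h | h
        · exact h
        · exfalso
          have hperm := hsp.perm_of_length_le h
          have : ∀ y, y ∈ s[i] ↔ y ∈ s[j] := by
            intro y
            rw [← mem_pvCanon (s[i]) y, ← mem_pvCanon (s[j]) y]
            exact ⟨fun hy => hperm.mem_iff.mp hy, fun hy => hperm.mem_iff.mpr hy⟩
          exact hxne (pvCanon_eq_of_mem_iff _ _ (fun y => (this y).symm))
      have hlen' : s[i].length < s[j].length := by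
        rw [← pvCanon_length _ (hn _ (List.getElem_mem hi)), ← pvCanon_length _ (hn _ (List.getElem_mem hj))]
        exact hlt
      have hji : j < i := by
        by_contra hge
        rcases Nat.eq_or_lt_of_le (Nat.le_of_not_lt hge) with h | h
        · subst h; omega
        · exact absurd (hlen i j hi hj h) (by omega)
      have hne' : (i : Int) ≠ (j : Int) := by exact_mod_cast (by omega : i ≠ j)
      have hgt : (j : Int) < (i : Int) := by exact_mod_cast hji
      exact L ((j : Int), s[j]) ⟨j, hj, rfl⟩ ⟨hne', hsub'⟩ (Or.inl hgt)
  · rintro ⟨hcount, hmax⟩ a ⟨k, hk, rfl⟩ ⟨hne, hsub⟩ hdisj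
    have hki : k ≠ i := by intro h; subst h; exact hne rfl
    by_cases hiff : ∀ x, x ∈ s[i] ↔ x ∈ s[k]
    · have hcjk : pvCanon s[k] = pvCanon s[i] := pvCanon_eq_of_mem_iff _ _ (fun x => (hiff x).symm)
      have := two_le_count_of_ne (List.map pvCanon s) (pvCanon s[i]) i k
        (by simpa using hi) (by simpa using hk) (fun h => hki h.symm) hmapi
        (by rw [← hcjk]; exact List.getElem_map _)
      omega
    · have hcne : pvCanon s[k] ≠ pvCanon s[i] := by
        intro h
        exact hiff (fun x => by rw [← mem_pvCanon (s[i]) x, ← mem_pvCanon (s[k]) x, h])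
      rcases hdisj with _ | heq
      · exact hmax (pvCanon s[k]) (List.mem_map_of_mem (List.getElem_mem hk)) hcne
          (fun y hy => (mem_pvCanon _ _).mpr (hsub y ((mem_pvCanon _ _).mp hy)))
      · exact hiff heq

-- ===== VERDICT (by name: the statement is the Claim_ definition above) =====
theorem toplexify_spec : Claim_equal_toplexify := by
  intro simplices _ hpre
  unfold Spec_toplexify toplexify toplexify_alt
  rw [PySem.List.foldl_append_if, PySem.List.foldl_append_if]
  simp only [List.nil_append]
  set s := PySem.List.sorted simplices (fun l => ((l.length : Nat) : Int)) true with hs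
  have hn : ∀ l ∈ s, l.Nodup := fun l hl =>
    hpre l ((PySem.List.mem_sorted simplices _ true l).mp (hs ▸ hl))
  have hpw : List.Pairwise (fun a b => ((b.length : Nat) : Int) ≤ ((a.length : Nat) : Int)) s :=
    hs ▸ PySem.List.sorted_pairwise_rev simplices (fun l => ((l.length : Nat) : Int))
  have hc : (s.foldl (fun d spx => d.modify (pvCanon spx) 0 (· + 1)) (PySem.Dict.empty : PySem.Dict (List Int) Int))
      = PySem.Dict.counter (s.map pvCanon) := by
    rw [PySem.Dict.counter_eq_foldl, List.foldl_map]
  rw [List.map_id']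
  apply enum_filter_snd
  intro i hi
  rw [hc]
  rw [PySem.Dict.getD_counter, PySem.Dict.keys_counter]
  simp only [PySem.List.foldl_append_if, List.nil_append]
  rw [Bool.eq_iff_iff]
  simp only [List.isEmpty_iff, List.map_eq_nil_iff, List.filter_eq_nil_iff,
    PySem.List.mem_enumerate_iff, Bool.and_eq_true, Bool.or_eq_true, Bool.not_eq_true',
    beq_iff_eq, decide_eq_true_eq,
    PySem.Set.issubset_iff, PySem.Set.equal_iff, PySem.Set.mem_ofList, beq_eq_false_iff_ne]
  simp only [zero_add, List.any_eq_false, Bool.and_eq_true, Bool.not_eq_true', beq_eq_false_iff_ne,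
    PySem.Set.issubset_iff, PySem.Set.mem_ofList, Nat.cast_eq_one, not_and]
  exact keep_core s hn hpw i hi
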